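-- pv_equiv track=rewrite | github.com/pypy/pypy | pypy/module/micronumpy/strides.py | _shape_agreement
-- ===== SOURCE A (Python) =====
-- def _shape_agreement(shape1, shape2):
--     """ Checks agreement about two shapes with respect to broadcasting. Returns
--     the resulting shape.
--     """
--     lshift = 0
--     rshift = 0
--     if len(shape1) > len(shape2):
--         m = len(shape1)
--         n = len(shape2)
--         rshift = len(shape2) - len(shape1)
--         remainder = shape1
--     else:
--         m = len(shape2)
--         n = len(shape1)
--         lshift = len(shape1) - len(shape2)
--         remainder = shape2
--     endshape = [0] * m
--     indices1 = [True] * m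
--     indices2 = [True] * m
--     for i in range(m - 1, m - n - 1, -1):
--         left = shape1[i + lshift]
--         right = shape2[i + rshift]
--         if left == right:
--             endshape[i] = left
--         elif left == 1:
--             endshape[i] = right
--             indices1[i + lshift] = False
--         elif right == 1:
--             endshape[i] = left
--             indices2[i + rshift] = False
--         else:
--             return []
--             #raise OperationError(space.w_ValueError, space.wrap(
--             #    "frames are not aligned"))
--     for i in range(m - n):
--         endshape[i] = remainder[i]
--     return endshape
-- ===== SOURCE B (Python) =====
-- def _shape_agreement(shape1, shape2):
--     m = max(len(shape1), len(shape2))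
--     s1 = [1] * (m - len(shape1)) + list(shape1)
--     s2 = [1] * (m - len(shape2)) + list(shape2)
--     out = []
--     for a, b in zip(s1, s2):
--         if a == b:
--             out.append(a)
--         elif a == 1:
--             out.append(b)
--         elif b == 1:
--             out.append(a)
--         else:
--             return []
--     return out
-- ===== Notes on version B (the rewrite author's own statement) =====
-- stated objective: simpler
-- what changed: B pre-pads both shapes with leading 1s to a common length and does one uniform zip pass, replacing A's shift-offset indexing, two-region index loops and unused indices1/indices2 bookkeeping.
import Mathlib
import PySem

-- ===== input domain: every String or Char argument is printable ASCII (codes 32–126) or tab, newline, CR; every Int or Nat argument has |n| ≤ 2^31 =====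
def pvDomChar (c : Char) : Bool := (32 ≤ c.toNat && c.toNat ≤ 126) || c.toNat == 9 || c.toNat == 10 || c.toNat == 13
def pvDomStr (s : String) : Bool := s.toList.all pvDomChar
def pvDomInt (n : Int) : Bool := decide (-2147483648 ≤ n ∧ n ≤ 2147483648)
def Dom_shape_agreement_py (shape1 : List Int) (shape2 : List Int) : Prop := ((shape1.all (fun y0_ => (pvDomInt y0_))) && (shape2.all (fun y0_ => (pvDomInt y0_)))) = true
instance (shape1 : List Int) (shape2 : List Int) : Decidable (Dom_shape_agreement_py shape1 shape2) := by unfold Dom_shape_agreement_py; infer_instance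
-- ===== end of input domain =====

-- B replaces A's shift-offset two-region index loops (and unused indices1/indices2
-- bookkeeping) by padding both shapes with leading 1s and one uniform zip pass; same cost.

-- ===== PORT A =====
-- the main for-loop of A (early `return []` modelled as `none`); carries the
-- (unused) indices1/indices2 lists exactly as A does
def aLoop (shape1 shape2 : List Int) (lshift rshift : Int) :
    List Int → List Int → List Bool → List Bool → Option (List Int)
  | [], endshape, _, _ => some endshape
  | i :: rest, endshape, indices1, indices2 =>
    let left := PySem.List.pyGetD shape1 (i + lshift) 0
    let right := PySem.List.pyGetD shape2 (i + rshift) 0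
    if left = right then
      aLoop shape1 shape2 lshift rshift rest (PySem.List.pySetD endshape i left) indices1 indices2
    else if left = 1 then
      aLoop shape1 shape2 lshift rshift rest (PySem.List.pySetD endshape i right)
        (PySem.List.pySetD indices1 (i + lshift) false) indices2
    else if right = 1 then
      aLoop shape1 shape2 lshift rshift rest (PySem.List.pySetD endshape i left)
        indices1 (PySem.List.pySetD indices2 (i + rshift) false)
    else none

def shape_agreement_py (shape1 : List Int) (shape2 : List Int) : List Int :=
  let len1 : Int := shape1.length
  let len2 : Int := shape2.length
  let (m, n, lshift, rshift, remainder) :=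
    if len1 > len2 then (len1, len2, (0 : Int), len2 - len1, shape1)
    else (len2, len1, len1 - len2, (0 : Int), shape2)
  let endshape := List.replicate m.toNat (0 : Int)
  let indices1 := List.replicate m.toNat true
  let indices2 := List.replicate m.toNat true
  match aLoop shape1 shape2 lshift rshift
      (PySem.List.pyRange (m - 1) (m - n - 1) (-1)) endshape indices1 indices2 with
  | none => []
  | some endshape =>
    (PySem.List.pyRange 0 (m - n) 1).foldl
      (fun es i => PySem.List.pySetD es i (PySem.List.pyGetD remainder i 0)) endshape

-- ===== PORT B =====
-- B's single pass over the zipped padded shapes, with accumulator `out`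
def bLoop : List (Int × Int) → List Int → Option (List Int)
  | [], out => some out
  | (a, b) :: rest, out =>
    if a = b then bLoop rest (out ++ [a])
    else if a = 1 then bLoop rest (out ++ [b])
    else if b = 1 then bLoop rest (out ++ [a])
    else none

def shape_agreement_py_alt (shape1 : List Int) (shape2 : List Int) : List Int :=
  let m := max shape1.length shape2.length
  let s1 := List.replicate (m - shape1.length) (1 : Int) ++ shape1
  let s2 := List.replicate (m - shape2.length) (1 : Int) ++ shape2
  match bLoop (s1.zip s2) [] with
  | none => []
  | some out => out

-- ===== PRECONDITION & SPEC =====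
def Spec_shape_agreement_py (shape1 : List Int) (shape2 : List Int) (out : List Int) : Prop := out = shape_agreement_py_alt shape1 shape2
instance (shape1 : List Int) (shape2 : List Int) (out : List Int) : Decidable (Spec_shape_agreement_py shape1 shape2 out) := by unfold Spec_shape_agreement_py; infer_instance

-- ===== CLAIM (what is proved, stated in full; the proofs are below) =====
def Claim_equal_shape_agreement_py : Prop := ∀ (shape1 : List Int) (shape2 : List Int), Dom_shape_agreement_py shape1 shape2 → Spec_shape_agreement_py shape1 shape2 (shape_agreement_py shape1 shape2)

-- ===== LEMMAS AND PROOFS =====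

-- pointwise broadcast of one dimension pair
def comb (a b : Int) : Option Int :=
  if a = b then some a else if a = 1 then some b else if b = 1 then some a else none

-- broadcast of a whole list of pairs
def combAll : List (Int × Int) → Option (List Int)
  | [] => some []
  | (a, b) :: t =>
    match comb a b, combAll t with
    | some c, some r => some (c :: r)
    | _, _ => none

theorem comb_one_left (b : Int) : comb 1 b = some b := by
  unfold comb; split_ifs with h <;> simp_all

theorem comb_one_right (a : Int) : comb a 1 = some a := by
  unfold comb; split_ifs with h <;> simp_all

theorem combAll_append (l1 l2 : List (Int × Int)) :
    combAll (l1 ++ l2) =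
      match combAll l1, combAll l2 with
      | some r1, some r2 => some (r1 ++ r2)
      | _, _ => none := by
  induction l1 with
  | nil => cases h : combAll l2 <;> simp [combAll, h]
  | cons p t ih =>
    obtain ⟨a, b⟩ := p
    simp only [List.cons_append, combAll, ih]
    cases comb a b <;> cases combAll t <;> cases combAll l2 <;> simp

theorem bLoop_char (l : List (Int × Int)) (out : List Int) :
    bLoop l out = (combAll l).map (out ++ ·) := by
  induction l generalizing out with
  | nil => simp [bLoop, combAll]
  | cons p t ih =>
    obtain ⟨a, b⟩ := p
    simp only [bLoop, combAll, comb]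
    split_ifs with h1 h2 h3 <;> simp [ih] <;> cases combAll t <;> simp

theorem combAll_zip_ones_right (l : List Int) :
    combAll (l.zip (List.replicate l.length 1)) = some l := by
  induction l with
  | nil => simp [combAll]
  | cons a t ih => simp [combAll, List.replicate_succ, ih, comb_one_right]

theorem combAll_zip_ones_left (l : List Int) :
    combAll ((List.replicate l.length 1).zip l) = some l := by
  induction l with
  | nil => simp [combAll]
  | cons a t ih => simp [combAll, List.replicate_succ, ih, comb_one_left]

theorem take_set_of_le {α : Type} (l : List α) (i j : Nat) (v : α) (h : j ≤ i) :
    (l.set i v).take j = l.take j := by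
  apply List.ext_getElem
  · simp
  · intro k h1 h2
    simp only [List.getElem_take, List.getElem_set]
    rw [if_neg (by simp at h1; omega)]

theorem drop_set_self {α : Type} (l : List α) (i : Nat) (v : α) (h : i < l.length) :
    (l.set i v).drop i = v :: l.drop (i + 1) := by
  apply List.ext_getElem
  · simp; omega
  · intro k h1 h2
    cases k with
    | zero => simp [List.getElem_drop]
    | succ k => simp [List.getElem_drop]; congr 1; omega

theorem drop_eq_cons {α : Type} [Inhabited α] (l : List α) (k : Nat) (h : k < l.length) :
    l.drop k = l.getD k default :: l.drop (k + 1) := by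
  rw [List.getD_eq_getElem l default h]
  exact List.drop_eq_getElem_cons h

-- the main loop of A, characterised against combAll over the padded lists
theorem aLoop_char (sh1 sh2 : List Int) (lsh rsh : Int) (p1 p2 : List Int) (m j : Nat)
    (hp1 : p1.length = m) (hp2 : p2.length = m)
    (hg1 : ∀ i : Nat, j ≤ i → i < m → PySem.List.pyGetD sh1 ((i : Int) + lsh) 0 = p1.getD i 0)
    (hg2 : ∀ i : Nat, j ≤ i → i < m → PySem.List.pyGetD sh2 ((i : Int) + rsh) 0 = p2.getD i 0)
    (e : Nat) (hj : j ≤ e) (he : e ≤ m) :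
    ∀ (es : List Int) (ind1 ind2 : List Bool), es.length = m →
    aLoop sh1 sh2 lsh rsh (PySem.List.pyRange ((e : Int) - 1) ((j : Int) - 1) (-1)) es ind1 ind2
      = match combAll (((p1.zip p2).drop j).take (e - j)) with
        | none => none
        | some r => some (es.take j ++ r ++ es.drop e) := by
  induction e, hj using Nat.le_induction with
  | base =>
    intro es ind1 ind2 hlen
    rw [PySem.List.pyRange_neg_one_eq_nil (le_refl _)]
    simp [aLoop, combAll]
  | succ e hje ih =>
    intro es ind1 ind2 hlen
    have hem : e < m := by omega
    have hzl : (p1.zip p2).length = m := by simp [hp1, hp2]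
    have hrange : PySem.List.pyRange ((e : Int) + 1 - 1) ((j : Int) - 1) (-1)
        = (e : Int) :: PySem.List.pyRange ((e : Int) - 1) ((j : Int) - 1) (-1) := by
      have : ((e : Int) + 1 - 1) = (e : Int) := by ring
      rw [this, PySem.List.pyRange_neg_one_cons (by omega)]
    have hseg : ((p1.zip p2).drop j).take (e + 1 - j)
        = ((p1.zip p2).drop j).take (e - j) ++ [(p1.getD e 0, p2.getD e 0)] := by
      have h1 : e + 1 - j = (e - j) + 1 := by omega
      rw [h1, List.take_add_one]
      congr 1
      have h2 : ((p1.zip p2).drop j)[e - j]? = (p1.zip p2)[j + (e - j)]? := by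
        simp [List.getElem?_drop]
      have h3 : j + (e - j) = e := by omega
      rw [h2, h3, List.getElem?_eq_getElem (by omega)]
      have g1 : p1.getD e 0 = p1[e] := List.getD_eq_getElem _ _ (by omega)
      have g2 : p2.getD e 0 = p2[e] := List.getD_eq_getElem _ _ (by omega)
      rw [List.getElem_zip, g1, g2]
      simp
    rw [show ((e + 1 : Nat) : Int) = (e : Int) + 1 by push_cast; ring, hrange, hseg]
    simp only [aLoop]
    rw [hg1 e hje hem, hg2 e hje hem]
    set a := p1.getD e 0
    set b := p2.getD e 0
    have hset : ∀ (c : Int), PySem.List.pySetD es ((e : Nat) : Int) c = es.set e c :=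
      fun c => PySem.List.pySetD_natCast es e c
    have hfin : ∀ (c : Int) (ind1' ind2' : List Bool), comb a b = some c →
        aLoop sh1 sh2 lsh rsh (PySem.List.pyRange ((e : Int) - 1) ((j : Int) - 1) (-1))
          (es.set e c) ind1' ind2'
        = match combAll (((p1.zip p2).drop j).take (e - j) ++ [(a, b)]) with
          | none => none
          | some r => some (es.take j ++ r ++ es.drop (e + 1)) := by
      intro c ind1' ind2' hc
      rw [ih (by omega) (es.set e c) ind1' ind2' (by simp [hlen]), combAll_append]
      have h1 : (es.set e c).take j = es.take j := take_set_of_le es e j c hje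
      have h2 : (es.set e c).drop e = c :: es.drop (e + 1) := drop_set_self es e c (by omega)
      have hcb : combAll [(a, b)] = some [c] := by simp [combAll, hc]
      rw [hcb]
      cases combAll (((p1.zip p2).drop j).take (e - j)) <;> simp [h1, h2]
    by_cases h1 : a = b
    · rw [if_pos h1, hset]
      rw [hfin a _ _ (by simp [comb, h1])]
    · rw [if_neg h1]
      by_cases h2 : a = 1
      · rw [if_pos h2, hset]
        rw [hfin b _ _ (by simp [comb, h2])]
      · rw [if_neg h2]
        by_cases h3 : b = 1
        · rw [if_pos h3, hset]
          rw [hfin a _ _ (by simp [comb, h2, h3])]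
        · rw [if_neg h3]
          have hcn : combAll [(a, b)] = none := by simp [combAll, comb, h1, h2, h3]
          rw [combAll_append, hcn]
          cases combAll (((p1.zip p2).drop j).take (e - j)) <;> simp

theorem set_append_len {α : Type} (l1 l2 : List α) (v : α) :
    (l1 ++ l2).set l1.length v = l1 ++ l2.set 0 v := by
  induction l1 with
  | nil => simp
  | cons a t ih => simp [ih]

-- A's second loop: overwrite the first k slots with remainder's entries
theorem fill_char (rem : List Int) (k : Nat) (hk : k ≤ rem.length) :
    ∀ (es : List Int), k ≤ es.length →
    (PySem.List.pyRange 0 (k : Int) 1).foldl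
        (fun es i => PySem.List.pySetD es i (PySem.List.pyGetD rem i 0)) es
      = rem.take k ++ es.drop k := by
  induction k with
  | zero =>
    intro es _
    rw [PySem.List.pyRange_one_eq_nil (by simp)]
    simp
  | succ k ih =>
    intro es hes
    have h1 : ((k + 1 : Nat) : Int) = (k : Int) + 1 := by push_cast; ring
    rw [h1, PySem.List.pyRange_one_succ_right (by positivity), List.foldl_append,
      ih (by omega) es (by omega)]
    simp only [List.foldl_cons, List.foldl_nil]
    rw [PySem.List.pySetD_natCast, PySem.List.pyGetD_natCast]
    have hlen : (rem.take k).length = k := by simp; omega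
    have h2 := set_append_len (rem.take k) (es.drop k) (rem.getD k 0)
    rw [hlen] at h2
    rw [h2, drop_eq_cons es k (by omega)]
    simp only [List.set_cons_zero]
    have ht : rem.take (k + 1) = rem.take k ++ [rem[k]] := by
      rw [List.take_add_one, List.getElem?_eq_getElem (by omega)]; simp
    rw [List.getD_eq_getElem _ _ (by omega), ht, List.append_assoc]
    rfl

theorem getD_append_right' {α : Type} (l1 l2 : List α) (n : Nat) (d : α) (h : l1.length ≤ n) :
    (l1 ++ l2).getD n d = l2.getD (n - l1.length) d := by
  simp [List.getD_eq_getElem?_getD, List.getElem?_append_right h]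

theorem A_eq_B_left (shape1 shape2 : List Int) (h : shape2.length < shape1.length) :
    shape_agreement_py shape1 shape2 = shape_agreement_py_alt shape1 shape2 := by
  have hk2 : shape2.length ≤ shape1.length := le_of_lt h
  simp only [shape_agreement_py, shape_agreement_py_alt]
  rw [if_pos (by exact_mod_cast h)]
  simp only [Int.toNat_natCast]
  set L1 := shape1.length with hL1
  set L2 := shape2.length with hL2
  set k := L1 - L2 with hkd
  set p2 := List.replicate k (1 : Int) ++ shape2 with hp2d
  have hp2len : p2.length = L1 := by simp [hp2d]; omega
  have hg1 : ∀ i : Nat, k ≤ i → i < L1 →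
      PySem.List.pyGetD shape1 ((i : Int) + 0) 0 = shape1.getD i 0 := by
    intro i _ _
    rw [add_zero]
    exact PySem.List.pyGetD_natCast shape1 i 0
  have hg2 : ∀ i : Nat, k ≤ i → i < L1 →
      PySem.List.pyGetD shape2 ((i : Int) + ((L2 : Int) - (L1 : Int))) 0 = p2.getD i 0 := by
    intro i hki him
    have hc : (i : Int) + ((L2 : Int) - (L1 : Int)) = ((i - k : Nat) : Int) := by omega
    rw [hc, PySem.List.pyGetD_natCast, hp2d, getD_append_right' _ _ _ _ (by simp; omega)]
    simp
  have hrg : ((L1 : Int) - (L2 : Int) - 1) = ((k : Int) - 1) := by omega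
  rw [hrg, aLoop_char shape1 shape2 0 ((L2 : Int) - (L1 : Int)) shape1 p2 L1 k rfl hp2len hg1 hg2
    L1 (by omega) (le_refl _) (List.replicate L1 0) (List.replicate L1 true)
    (List.replicate L1 true) (by simp)]
  have hsplit : shape1.zip p2
      = (shape1.take k).zip (List.replicate k 1) ++ (shape1.drop k).zip shape2 := by
    conv_lhs => rw [← List.take_append_drop k shape1]
    rw [hp2d, List.zip_append (by simp; omega)]
  have hpre : combAll ((shape1.take k).zip (List.replicate k 1)) = some (shape1.take k) := by
    have hl : (shape1.take k).length = k := by simp; omega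
    have h2 := combAll_zip_ones_right (shape1.take k)
    rw [hl] at h2
    exact h2
  have hdrop : (shape1.zip p2).drop k = (shape1.drop k).zip shape2 := by
    rw [hsplit, List.drop_left' (by simp; omega)]
  have hseg2 : ((shape1.zip p2).drop k).take (L1 - k) = (shape1.drop k).zip shape2 := by
    rw [hdrop]
    apply List.take_of_length_le
    simp
    omega
  rw [hseg2, bLoop_char]
  have hmax : max L1 L2 = L1 := Nat.max_eq_left hk2
  rw [hmax]
  simp only [Nat.sub_self, List.replicate_zero, List.nil_append]
  rw [← hkd, ← hp2d, hsplit, combAll_append, hpre]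
  cases hcc : combAll ((shape1.drop k).zip shape2) with
  | none => simp
  | some r =>
    simp only
    have hc3 : ((L1 : Int) - (L2 : Int)) = (k : Int) := by omega
    rw [hc3, fill_char shape1 k (by omega) _ (by simp; omega)]
    have hlt : ((List.replicate L1 (0 : Int)).take k).length = k := by simp; omega
    have hdk : (((List.replicate L1 (0 : Int)).take k) ++ r ++ (List.replicate L1 (0 : Int)).drop L1).drop k = r := by
      rw [List.drop_replicate]
      simp only [Nat.sub_self, List.replicate_zero, List.append_nil]
      rw [List.drop_left' hlt]
    rw [hdk]
    simp

theorem A_eq_B_right (shape1 shape2 : List Int) (h : shape1.length ≤ shape2.length) :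
    shape_agreement_py shape1 shape2 = shape_agreement_py_alt shape1 shape2 := by
  simp only [shape_agreement_py, shape_agreement_py_alt]
  rw [if_neg (by exact_mod_cast Nat.not_lt.mpr h)]
  simp only [Int.toNat_natCast]
  set L1 := shape1.length with hL1
  set L2 := shape2.length with hL2
  set k := L2 - L1 with hkd
  set p1 := List.replicate k (1 : Int) ++ shape1 with hp1d
  have hp1len : p1.length = L2 := by simp [hp1d]; omega
  have hg1 : ∀ i : Nat, k ≤ i → i < L2 →
      PySem.List.pyGetD shape1 ((i : Int) + ((L1 : Int) - (L2 : Int))) 0 = p1.getD i 0 := by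
    intro i hki him
    have hc : (i : Int) + ((L1 : Int) - (L2 : Int)) = ((i - k : Nat) : Int) := by omega
    rw [hc, PySem.List.pyGetD_natCast, hp1d, getD_append_right' _ _ _ _ (by simp; omega)]
    simp
  have hg2 : ∀ i : Nat, k ≤ i → i < L2 →
      PySem.List.pyGetD shape2 ((i : Int) + 0) 0 = shape2.getD i 0 := by
    intro i _ _
    rw [add_zero]
    exact PySem.List.pyGetD_natCast shape2 i 0
  have hrg : ((L2 : Int) - (L1 : Int) - 1) = ((k : Int) - 1) := by omega
  rw [hrg, aLoop_char shape1 shape2 ((L1 : Int) - (L2 : Int)) 0 p1 shape2 L2 k hp1len rfl hg1 hg2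
    L2 (by omega) (le_refl _) (List.replicate L2 0) (List.replicate L2 true)
    (List.replicate L2 true) (by simp)]
  have hsplit : p1.zip shape2
      = (List.replicate k 1).zip (shape2.take k) ++ shape1.zip (shape2.drop k) := by
    conv_lhs => rw [show shape2 = shape2.take k ++ shape2.drop k from (List.take_append_drop k shape2).symm]
    rw [hp1d, List.zip_append (by simp; omega)]
  have hpre : combAll ((List.replicate k 1).zip (shape2.take k)) = some (shape2.take k) := by
    have hl : (shape2.take k).length = k := by simp; omega
    have h2 := combAll_zip_ones_left (shape2.take k)
    rw [hl] at h2
    exact h2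
  have hdrop : (p1.zip shape2).drop k = shape1.zip (shape2.drop k) := by
    rw [hsplit, List.drop_left' (by simp; omega)]
  have hseg2 : ((p1.zip shape2).drop k).take (L2 - k) = shape1.zip (shape2.drop k) := by
    rw [hdrop]
    apply List.take_of_length_le
    simp
    omega
  rw [hseg2, bLoop_char]
  have hmax : max L1 L2 = L2 := Nat.max_eq_right h
  rw [hmax]
  simp only [Nat.sub_self, List.replicate_zero, List.nil_append]
  rw [← hkd, ← hp1d, hsplit, combAll_append, hpre]
  cases hcc : combAll (shape1.zip (shape2.drop k)) with
  | none => simp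
  | some r =>
    simp only
    have hc3 : ((L2 : Int) - (L1 : Int)) = (k : Int) := by omega
    rw [hc3, fill_char shape2 k (by omega) _ (by simp; omega)]
    have hlt : ((List.replicate L2 (0 : Int)).take k).length = k := by simp; omega
    have hdk : (((List.replicate L2 (0 : Int)).take k) ++ r ++ (List.replicate L2 (0 : Int)).drop L2).drop k = r := by
      rw [List.drop_replicate]
      simp only [Nat.sub_self, List.replicate_zero, List.append_nil]
      rw [List.drop_left' hlt]
    rw [hdk]
    simp

theorem shape_agreement_py_spec : Claim_equal_shape_agreement_py := by
  intro shape1 shape2 _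
  unfold Spec_shape_agreement_py
  by_cases h : shape2.length < shape1.length
  · exact A_eq_B_left shape1 shape2 h
  · exact A_eq_B_right shape1 shape2 (by omega)
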